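-- pv_equiv track=rewrite | github.com/Akella2345/criptography | p2.py | NLFSR
-- ===== SOURCE A (Python) =====
-- from operator import xor
--
-- def NLFSR(f, s, k):
--
--     assert(len(f[0])==len(s))
--
--     fin_cadena = ""
--     fin_lista = []
--
--     #generamos K numeros
--     for _ in range(0,k):
--         #f monomios
--         sj = 0
--         for i in f:
--             r = 1
--             #j variables
--             for j,sem in zip(i,s):
--                 r += sem*j
--             r = r%2
--             sj = xor(sj,r)
--
--         fin_cadena += str(sj)
--         fin_lista.append(sj)
--         s = [sj]+s
--         s = s[0:len(s)-1]
--
--     return fin_cadena,fin_lista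
-- ===== SOURCE B (Python) =====
-- def NLFSR(f, s, k):
--     assert len(f[0]) == len(s)
--     # Collapse f once into one coefficient per state position: the parity of the
--     # sum of all monomial dot-products equals the parity of one dot with the
--     # column sums (plus len(f) for the per-monomial +1).  The k-loop then never
--     # touches f.
--     c = [sum(row[p] for row in f if p < len(row)) for p in range(len(s))]
--     base = len(f)
--     bits = []
--     for _ in range(k):
--         b = (base + sum(cp * sp for cp, sp in zip(c, s))) % 2
--         bits.append(b)
--         s = ([b] + s)[:-1]
--     return "".join(map(str, bits)), bits
-- ===== Notes on version B (the rewrite author's own statement) =====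
-- stated objective: faster
-- what changed: B precomputes, once before the loop, the column sums of f (one coefficient per state position, short rows contributing 0), so each of the k output bits is a single dot product with that vector plus len(f) taken mod 2 instead of A's per-monomial dot-product/mod/XOR accumulation over all of f; the bit string is joined once at the end.
import Mathlib
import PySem

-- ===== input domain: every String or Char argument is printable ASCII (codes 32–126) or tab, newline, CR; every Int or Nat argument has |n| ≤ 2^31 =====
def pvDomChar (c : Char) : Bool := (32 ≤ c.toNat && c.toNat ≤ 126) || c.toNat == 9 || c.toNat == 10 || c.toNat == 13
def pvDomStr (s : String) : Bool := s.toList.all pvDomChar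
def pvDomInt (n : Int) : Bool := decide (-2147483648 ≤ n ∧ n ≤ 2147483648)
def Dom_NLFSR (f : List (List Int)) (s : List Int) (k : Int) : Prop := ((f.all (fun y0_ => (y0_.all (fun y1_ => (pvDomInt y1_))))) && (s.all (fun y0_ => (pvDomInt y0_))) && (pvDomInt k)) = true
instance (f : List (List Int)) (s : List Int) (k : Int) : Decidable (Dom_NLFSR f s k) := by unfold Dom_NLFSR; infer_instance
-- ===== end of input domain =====

-- B collapses f once into one column-sum coefficient per state position, so the k-loop
-- computes each bit as a single dot product with that vector and never touches f again.

-- ===== PORT A =====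
-- one iteration of A's outer loop: state = (fin_cadena, fin_lista, s)
def NLFSR_stepA (f : List (List Int)) (st : String × List Int × List Int) (_ : Int) :
    String × List Int × List Int :=
  let sj := f.foldl (fun sj i =>
    let r := (i.zip st.2.2).foldl (fun r p => r + p.2 * p.1) 1   -- r = 1; r += sem*j
    PySem.Int.bxor sj (PySem.Int.mod r 2)) 0                      -- r = r%2; sj = xor(sj, r)
  let s1 := [sj] ++ st.2.2                                        -- s = [sj]+s
  (st.1 ++ PySem.Int.toStr sj, st.2.1 ++ [sj],
    PySem.List.slice s1 (some 0) (some ((s1.length : Int) - 1)))  -- s = s[0:len(s)-1]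

def NLFSR (f : List (List Int)) (s : List Int) (k : Int) : String × List Int :=
  let res := (PySem.List.pyRange 0 k 1).foldl (NLFSR_stepA f) ("", [], s)
  (res.1, res.2.1)

-- ===== PORT B =====
-- c = [sum(row[p] for row in f if p < len(row)) for p in range(len(s))]
def NLFSR_coeffs (f : List (List Int)) (s : List Int) : List Int :=
  (PySem.List.pyRange 0 (s.length : Int) 1).map (fun p =>
    f.foldl (fun a row => if p < (row.length : Int) then a + PySem.List.pyGetD row p 0 else a) 0)

-- one iteration of B's loop: state = (bits, s); c and base = len(f) are fixed outside
def NLFSR_stepB (c : List Int) (base : Int) (st : List Int × List Int) (_ : Int) :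
    List Int × List Int :=
  let b := PySem.Int.mod (base + (c.zip st.2).foldl (fun a q => a + q.1 * q.2) 0) 2
  (st.1 ++ [b], PySem.List.slice ([b] ++ st.2) none (some (-1)))   -- s = ([b]+s)[:-1]

def NLFSR_alt (f : List (List Int)) (s : List Int) (k : Int) : String × List Int :=
  let c := NLFSR_coeffs f s
  let res := (PySem.List.pyRange 0 k 1).foldl (NLFSR_stepB c (f.length : Int)) ([], s)
  (PySem.Str.join "" (res.1.map PySem.Int.toStr), res.1)

-- ===== PRECONDITION & SPEC =====
-- A asserts len(f[0]) == len(s) and indexes f[0]: excluded are exactly the inputs where A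
-- raises (f empty → IndexError; length mismatch → AssertionError).
def Pre_NLFSR (f : List (List Int)) (s : List Int) (k : Int) : Prop :=
  f ≠ [] ∧ (f.headD []).length = s.length
instance (f : List (List Int)) (s : List Int) (k : Int) : Decidable (Pre_NLFSR f s k) := by
  unfold Pre_NLFSR; infer_instance
def pvWitness_NLFSR : List (List Int) × List Int × Int := ([[1, 0]], [1, 1], 3)

def Spec_NLFSR (f : List (List Int)) (s : List Int) (k : Int) (out : String × List Int) : Prop := out = NLFSR_alt f s k
instance (f : List (List Int)) (s : List Int) (k : Int) (out : String × List Int) : Decidable (Spec_NLFSR f s k out) := by unfold Spec_NLFSR; infer_instance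

-- ===== CLAIM (what is proved, stated in full; the proofs are below) =====
def Claim_equal_NLFSR : Prop := ∀ (f : List (List Int)) (s : List Int) (k : Int), Dom_NLFSR f s k → Pre_NLFSR f s k → Spec_NLFSR f s k (NLFSR f s k)

-- ===== LEMMAS AND PROOFS =====

-- the contribution of one monomial row at state position p (0 when the row is too short)
def pvContrib (row : List Int) (p : Nat) : Int :=
  if p < row.length then row.getD p 0 else 0

-- XOR of two bits obtained by %2 is the %2 of the sum
lemma bxor_mod_two (t r : Int) :
    PySem.Int.bxor (PySem.Int.mod t 2) (PySem.Int.mod r 2) = PySem.Int.mod (t + r) 2 := by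
  rw [PySem.Int.mod_eq_emod_of_pos (by norm_num), PySem.Int.mod_eq_emod_of_pos (by norm_num),
    PySem.Int.mod_eq_emod_of_pos (by norm_num)]
  rcases Int.emod_two_eq t with ht | ht <;> rcases Int.emod_two_eq r with hr | hr <;>
    rw [ht, hr]
  · rw [show PySem.Int.bxor 0 0 = 0 from by decide]; omega
  · rw [show PySem.Int.bxor 0 1 = 1 from by decide]; omega
  · rw [show PySem.Int.bxor 1 0 = 1 from by decide]; omega
  · rw [show PySem.Int.bxor 1 1 = 0 from by decide]; omega

-- A's XOR accumulation over the monomials is the parity of the sum of the (1+dot) terms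
lemma xorfold_eq_parity (s : List Int) (f : List (List Int)) (t : Int) :
    f.foldl (fun sj i =>
        PySem.Int.bxor sj (PySem.Int.mod ((i.zip s).foldl (fun r p => r + p.2 * p.1) 1) 2))
      (PySem.Int.mod t 2)
    = PySem.Int.mod (t + (f.map (fun i =>
        1 + ((i.zip s).map (fun p => p.2 * p.1)).sum)).sum) 2 := by
  induction f generalizing t with
  | nil => simp
  | cons i f ih =>
    simp only [List.foldl_cons, List.map_cons, List.sum_cons]
    rw [PySem.List.foldl_add (i.zip s) (fun p => p.2 * p.1) 1, bxor_mod_two, ih]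
    congr 1
    ring

-- one column of NLFSR_coeffs is the sum of the row contributions at that position
lemma coeffs_col (f : List (List Int)) (k : Nat) :
    f.foldl (fun a row =>
        if (k : Int) < (row.length : Int) then a + PySem.List.pyGetD row (k : Int) 0 else a) 0
    = (f.map (fun row => pvContrib row k)).sum := by
  have hfun : (fun (a : Int) (row : List Int) =>
      if (k : Int) < (row.length : Int) then a + PySem.List.pyGetD row (k : Int) 0 else a)
      = fun a row => a + pvContrib row k := by
    funext a row
    simp only [pvContrib, PySem.List.pyGetD_natCast]
    split_ifs with h1 h2 h2
    · rfl
    · exact absurd (by exact_mod_cast h1) h2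
    · exact absurd (by exact_mod_cast h2) h1
    · exact (add_zero a).symm
  rw [hfun, PySem.List.foldl_add f (fun row => pvContrib row k) 0, zero_add]

-- dot product of a range-comprehension with a list, as a sum over indices
lemma zip_map_range_sum (g : Nat → Int) (s : List Int) :
    ((((List.range s.length).map g).zip s).map (fun q => q.1 * q.2)).sum
    = ((List.range s.length).map (fun k => g k * s.getD k 0)).sum := by
  induction s generalizing g with
  | nil => simp
  | cons x t ih =>
    simp only [List.length_cons, List.range_succ_eq_map, List.map_cons, List.map_map,
      List.zip_cons_cons, List.sum_cons]
    rw [ih (g ∘ Nat.succ), show (x :: t).getD 0 0 = x from rfl]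
    congr 1

-- the per-row dot product written as a sum over all state positions
lemma row_dot (row s : List Int) :
    ((List.range s.length).map (fun k => pvContrib row k * s.getD k 0)).sum
    = ((row.zip s).map (fun p => p.2 * p.1)).sum := by
  induction s generalizing row with
  | nil => simp
  | cons x t ih =>
    cases row with
    | nil => simp [pvContrib]
    | cons y r =>
      simp only [List.length_cons, List.range_succ_eq_map, List.map_cons, List.map_map,
        List.sum_cons, List.zip_cons_cons]
      have h0 : pvContrib (y :: r) 0 * (x :: t).getD 0 0 = x * y := by
        simp [pvContrib]; ring
      have hsucc : ((List.range t.length).map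
            ((fun k => pvContrib (y :: r) k * (x :: t).getD k 0) ∘ Nat.succ)).sum
          = ((List.range t.length).map (fun k => pvContrib r k * t.getD k 0)).sum := by
        congr 1
        apply List.map_congr_left
        intro k _
        simp [Function.comp, pvContrib, List.getD]
      rw [h0, hsucc, ih r]

-- the collapsed dot product equals the sum of all per-row dot products (lengths equal)
lemma colsum_swap (f : List (List Int)) (s : List Int) :
    ((List.range s.length).map
        (fun k => (f.map (fun row => pvContrib row k)).sum * s.getD k 0)).sum
    = (f.map (fun i => ((i.zip s).map (fun p => p.2 * p.1)).sum)).sum := by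
  induction f with
  | nil => simp
  | cons i f ih =>
    simp only [List.map_cons, List.sum_cons]
    rw [← ih, ← row_dot i s, ← PySem.List.sum_map_add_int]
    congr 1
    apply List.map_congr_left
    intro k _
    ring

-- the collapsed dot product equals the sum of all per-row dot products (lengths equal)
lemma coeffs_dot (f : List (List Int)) (s0 s : List Int) (hlen : s.length = s0.length) :
    (((NLFSR_coeffs f s0).zip s).map (fun q => q.1 * q.2)).sum
    = (f.map (fun i => ((i.zip s).map (fun p => p.2 * p.1)).sum)).sum := by
  unfold NLFSR_coeffs
  rw [show ((s0.length : Int)) = ((s0.length : Nat) : Int) from rfl,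
    PySem.List.pyRange_zero_natCast, List.map_map, ← hlen]
  have hc : (List.range s.length).map ((fun p =>
        f.foldl (fun a row => if p < (row.length : Int) then a + PySem.List.pyGetD row p 0 else a) 0)
      ∘ (fun k : Nat => (k : Int)))
      = (List.range s.length).map (fun k => (f.map (fun row => pvContrib row k)).sum) := by
    apply List.map_congr_left
    intro k _
    exact coeffs_col f k
  rw [hc, zip_map_range_sum, colsum_swap]

-- both shift expressions drop the last element of [x] ++ s
lemma shift_eq (x : Int) (s : List Int) :
    PySem.List.slice ([x] ++ s) (some 0) (some ((([x] ++ s).length : Int) - 1))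
    = ([x] ++ s).dropLast := by
  rw [PySem.List.slice_zero_start,
    PySem.List.slice_to ([x] ++ s) (b := (([x] ++ s).length : Int) - 1) (by simp)]
  rw [List.dropLast_eq_take]
  congr 1
  simp

lemma join_empty_cons (a : String) (l : List String) :
    PySem.Str.join "" (a :: l) = a ++ PySem.Str.join "" l := by
  apply String.toList_inj.mp
  cases l <;> simp [PySem.Str.toList_join, PySem.Chars.join, List.intercalate]

lemma join_empty_nil : PySem.Str.join "" ([] : List String) = "" := by
  apply String.toList_inj.mp
  simp [PySem.Str.toList_join, PySem.Chars.join, List.intercalate]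

lemma join_empty_snoc (l : List Int) (x : Int) :
    PySem.Str.join "" ((l ++ [x]).map PySem.Int.toStr)
    = PySem.Str.join "" (l.map PySem.Int.toStr) ++ PySem.Int.toStr x := by
  induction l with
  | nil => simp [join_empty_cons, join_empty_nil]
  | cons a l ih =>
    simp only [List.cons_append, List.map_cons, join_empty_cons, ih]
    exact (String.append_assoc ..).symm

-- the two loop bodies preserve the relation between the states
lemma step_eq (f : List (List Int)) (s0 bits s : List Int) (hlen : s.length = s0.length)
    (z : Int) :
    NLFSR_stepA f (PySem.Str.join "" (bits.map PySem.Int.toStr), bits, s) z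
    = ((PySem.Str.join ""
          ((NLFSR_stepB (NLFSR_coeffs f s0) (f.length : Int) (bits, s) z).1.map PySem.Int.toStr)),
       (NLFSR_stepB (NLFSR_coeffs f s0) (f.length : Int) (bits, s) z).1,
       (NLFSR_stepB (NLFSR_coeffs f s0) (f.length : Int) (bits, s) z).2) := by
  unfold NLFSR_stepA NLFSR_stepB
  simp only
  have h0 := xorfold_eq_parity s f 0
  rw [show PySem.Int.mod (0:Int) 2 = 0 from by decide] at h0
  have hsum : (0 : Int) + (f.map (fun i =>
      1 + ((i.zip s).map (fun p => p.2 * p.1)).sum)).sum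
      = (f.length : Int) + ((NLFSR_coeffs f s0).zip s).foldl (fun a q => a + q.1 * q.2) 0 := by
    rw [PySem.List.foldl_add ((NLFSR_coeffs f s0).zip s) (fun q : Int × Int => q.1 * q.2) 0,
      coeffs_dot f s0 s hlen,
      PySem.List.sum_map_add_int f (fun _ => (1 : Int))
        (fun i => ((i.zip s).map (fun p => p.2 * p.1)).sum),
      PySem.List.sum_map_const_int]
    ring
  rw [h0, hsum, shift_eq, PySem.List.slice_to_neg_one, join_empty_snoc]

-- stepB keeps the state length
lemma stepB_len (c : List Int) (base : Int) (bits s : List Int) (z : Int) :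
    ((NLFSR_stepB c base (bits, s) z).2).length = s.length := by
  unfold NLFSR_stepB
  simp [PySem.List.slice_to_neg_one]

-- loop invariant: A's fold state is B's fold state decorated with the joined string
lemma loop_eq (f : List (List Int)) (s0 : List Int) (r : List Int) :
    ∀ (bits s : List Int), s.length = s0.length →
      r.foldl (NLFSR_stepA f) (PySem.Str.join "" (bits.map PySem.Int.toStr), bits, s)
      = ((PySem.Str.join ""
            ((r.foldl (NLFSR_stepB (NLFSR_coeffs f s0) (f.length : Int)) (bits, s)).1.map
              PySem.Int.toStr)),
         (r.foldl (NLFSR_stepB (NLFSR_coeffs f s0) (f.length : Int)) (bits, s)).1,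
         (r.foldl (NLFSR_stepB (NLFSR_coeffs f s0) (f.length : Int)) (bits, s)).2) := by
  induction r with
  | nil => intro bits s _; simp
  | cons z r ih =>
    intro bits s hlen
    simp only [List.foldl_cons, step_eq f s0 bits s hlen z]
    have hlen' := stepB_len (NLFSR_coeffs f s0) (f.length : Int) bits s z
    rw [ih _ _ (by rw [hlen', hlen])]

-- ===== VERDICT (by name: the statement is the Claim_ definition above) =====
theorem NLFSR_spec : Claim_equal_NLFSR := by
  intro f s k _ _
  unfold Spec_NLFSR NLFSR NLFSR_alt
  have h := loop_eq f s (PySem.List.pyRange 0 k 1) [] s rfl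
  simp only [List.map_nil, join_empty_nil] at h
  simp only [h]
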